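-- pv_equiv track=rewrite | github.com/biuboomc/agentic-safety-tutorial | tasksvc/rules/evaluation_hints.py | normalize_provenance_list
-- ===== SOURCE A (Python) =====
-- ALLOWED_PROVENANCE_SOURCES = (
--     "plan",
--     "success_rule",
--     "success_spec",
--     "state_spec",
--     "tool_protocols",
--     "benchmark_semantics",
--     "rule_lowering",
-- )
--
-- def _unique_list(values):
--     seen = set()
--     ordered = []
--     for value in values or []:
--         text = str(value or "").strip()
--         if not text or text in seen:
--             continue
--         seen.add(text)
--         ordered.append(text)
--     return ordered
--
-- def normalize_provenance_list(provenance, fallback=None):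
--     allowed = set(ALLOWED_PROVENANCE_SOURCES)
--     normalized = []
--     seen = set()
--     for item in provenance or []:
--         text = str(item or "").strip()
--         if not text:
--             continue
--         if text not in allowed:
--             raise ValueError(f"Unsupported provenance source: {text}")
--         if text in seen:
--             continue
--         seen.add(text)
--         normalized.append(text)
--     if normalized:
--         return normalized
--     fallback_values = [item for item in (fallback or []) if str(item or "").strip() in allowed]
--     return _unique_list(fallback_values)
-- ===== SOURCE B (Python) =====
-- ALLOWED_PROVENANCE_SOURCES = (
--     "plan",
--     "success_rule",
--     "success_spec",
--     "state_spec",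
--     "tool_protocols",
--     "benchmark_semantics",
--     "rule_lowering",
-- )
--
-- def _select(texts, allowed, strict):
--     # Worklist algorithm: repeatedly scan for the next admissible text, emit it,
--     # and purge all its later duplicates from the remaining worklist.
--     # No seen-set is ever maintained: uniqueness of the output comes from the purge.
--     out = []
--     rest = texts
--     while rest:
--         k = None
--         for i, t in enumerate(rest):
--             if not t:
--                 continue
--             if t not in allowed:
--                 if strict:
--                     raise ValueError(f"Unsupported provenance source: {t}")
--                 continue
--             k = i
--             break
--         if k is None:
--             break
--         t = rest[k]
--         out.append(t)
--         rest = [x for x in rest[k + 1:] if x != t]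
--     return out
--
-- def normalize_provenance_list(provenance, fallback=None):
--     allowed = set(ALLOWED_PROVENANCE_SOURCES)
--     result = _select([str(x or "").strip() for x in (provenance or [])], allowed, True)
--     if result:
--         return result
--     return _select([str(x or "").strip() for x in (fallback or [])], allowed, False)
-- ===== Notes on version B (the rewrite author's own statement) =====
-- stated objective: alternative
-- what changed: A streams items once through a fused validate-and-dedup loop keyed by a growing seen-set (with a second strip-and-dedup helper for the fallback); B maintains no seen structure at all: it pre-strips the items into a worklist and repeatedly scans for the next admissible text, emits it, and purges its later duplicates from the worklist, using the same worklist routine (strict vs silent) for both the provenance and the fallback path.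
import Mathlib
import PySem

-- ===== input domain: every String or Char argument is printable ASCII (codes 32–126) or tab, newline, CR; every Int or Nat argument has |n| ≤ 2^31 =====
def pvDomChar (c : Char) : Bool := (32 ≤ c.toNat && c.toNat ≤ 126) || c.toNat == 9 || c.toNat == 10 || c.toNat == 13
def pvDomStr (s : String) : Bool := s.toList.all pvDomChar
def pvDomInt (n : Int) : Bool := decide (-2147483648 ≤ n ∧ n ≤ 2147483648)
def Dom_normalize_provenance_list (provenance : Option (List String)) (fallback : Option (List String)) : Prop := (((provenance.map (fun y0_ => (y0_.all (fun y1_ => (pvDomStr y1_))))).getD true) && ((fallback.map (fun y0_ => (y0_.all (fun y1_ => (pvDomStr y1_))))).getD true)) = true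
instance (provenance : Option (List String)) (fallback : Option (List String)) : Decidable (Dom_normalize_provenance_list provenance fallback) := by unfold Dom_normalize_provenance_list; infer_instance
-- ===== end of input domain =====

-- B replaces A's fused validate+dedup loop with its seen-set by a worklist algorithm with no
-- seen structure: scan for the next admissible text, emit it, purge its later duplicates
-- (objective: alternative algorithm of similar cost).

def pyAllowed : List String :=
  ["plan", "success_rule", "success_spec", "state_spec", "tool_protocols",
   "benchmark_semantics", "rule_lowering"]

-- ===== PORT A =====
-- helper _unique_list, transliterated (for-loop carrying (ordered, seen))
def pvUniqueList (values : List String) : List String :=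
  (values.foldl (fun (acc : List String × PySem.Set String) value =>
      let text := PySem.Str.strip value
      if text = "" ∨ acc.2.contains text then acc
      else (acc.1 ++ [text], PySem.Set.add acc.2 text))
    ([], PySem.Set.empty)).1

def normalize_provenance_list (provenance : Option (List String)) (fallback : Option (List String)) : List String :=
  let st := (provenance.getD []).foldl (fun (acc : List String × PySem.Set String) item =>
      let text := PySem.Str.strip item
      if text = "" then acc
      else if pyAllowed.contains text = false then acc  -- Python raises ValueError here; excluded by Pre_
      else if acc.2.contains text then acc
      else (acc.1 ++ [text], PySem.Set.add acc.2 text)) ([], PySem.Set.empty)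
  if st.1.isEmpty then
    pvUniqueList ((fallback.getD []).filter (fun item => pyAllowed.contains (PySem.Str.strip item)))
  else st.1

-- ===== PORT B =====
-- the inner for-loop of _select: index of the first admissible text, returned together with
-- the worklist tail after it (rest[k+1:]); none = the scan found nothing (k is None)
def pvScan : List String → Option (String × List String)
  | [] => none
  | t :: rest =>
      if t = "" then pvScan rest
      else if pyAllowed.contains t then some (t, rest)
      else pvScan rest  -- with strict=True Python raises ValueError here; excluded by Pre_

theorem pvScan_length {l : List String} {t : String} {rest : List String}
    (h : pvScan l = some (t, rest)) : rest.length < l.length := by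
  induction l with
  | nil => simp [pvScan] at h
  | cons x xs ih =>
    by_cases h0 : x = ""
    · simp [pvScan, h0] at h; exact Nat.lt_succ_of_lt (ih h)
    · by_cases h1 : x ∈ pyAllowed
      · simp [pvScan, h0, h1] at h; simp [h.2]
      · simp [pvScan, h0, h1] at h; exact Nat.lt_succ_of_lt (ih h)

-- the while-loop of _select (strict only controls the raise, which Pre_ excludes)
def pvSelect (rest : List String) : List String :=
  match h : pvScan rest with
  | none => []
  | some (t, tail) => t :: pvSelect (tail.filter (fun x => x ≠ t))
termination_by rest.length
decreasing_by
  exact Nat.lt_of_le_of_lt (List.length_filter_le _ _) (pvScan_length h)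

def normalize_provenance_list_alt (provenance : Option (List String)) (fallback : Option (List String)) : List String :=
  let result := pvSelect ((provenance.getD []).map (fun x => PySem.Str.strip x))
  if result.isEmpty then
    pvSelect ((fallback.getD []).map (fun x => PySem.Str.strip x))
  else result

-- ===== PRECONDITION & SPEC =====
-- Pre_: every provenance item must be blank after stripping or an allowed source; on any other
-- item Python A raises ValueError (no value returned), so exactly those inputs are excluded.
def Pre_normalize_provenance_list (provenance : Option (List String)) (fallback : Option (List String)) : Prop :=
  ∀ s ∈ provenance.getD [], PySem.Str.strip s = "" ∨ pyAllowed.contains (PySem.Str.strip s) = true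

instance (provenance : Option (List String)) (fallback : Option (List String)) : Decidable (Pre_normalize_provenance_list provenance fallback) := by unfold Pre_normalize_provenance_list; infer_instance

def pvWitness_normalize_provenance_list : Option (List String) × Option (List String) :=
  (some ["plan", " plan ", "", "state_spec"], some ["x"])

def Spec_normalize_provenance_list (provenance : Option (List String)) (fallback : Option (List String)) (out : List String) : Prop := out = normalize_provenance_list_alt provenance fallback
instance (provenance : Option (List String)) (fallback : Option (List String)) (out : List String) : Decidable (Spec_normalize_provenance_list provenance fallback out) := by unfold Spec_normalize_provenance_list; infer_instance

-- ===== CLAIM (what is proved, stated in full; the proofs are below) =====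
def Claim_equal_normalize_provenance_list : Prop := ∀ (provenance : Option (List String)) (fallback : Option (List String)), Dom_normalize_provenance_list provenance fallback → Pre_normalize_provenance_list provenance fallback → Spec_normalize_provenance_list provenance fallback (normalize_provenance_list provenance fallback)

-- ===== LEMMAS AND PROOFS =====

-- the admissible texts of a (pre-stripped) list, in order, duplicates kept
def pvClean (l : List String) : List String :=
  l.filter (fun t => if t = "" then false else pyAllowed.contains t)

theorem pvScan_none {l : List String} (h : pvScan l = none) : pvClean l = [] := by
  induction l with
  | nil => rfl
  | cons x xs ih =>
    by_cases h0 : x = ""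
    · simp [pvScan, h0] at h; simpa [pvClean, h0] using ih h
    · by_cases h1 : x ∈ pyAllowed
      · simp [pvScan, h0, h1] at h
      · simp [pvScan, h0, h1] at h; simpa [pvClean, h0, h1] using ih h

theorem pvScan_some {l : List String} {t : String} {rest : List String}
    (h : pvScan l = some (t, rest)) :
    pvClean l = t :: pvClean rest ∧ t ≠ "" ∧ t ∈ pyAllowed := by
  induction l with
  | nil => simp [pvScan] at h
  | cons x xs ih =>
    by_cases h0 : x = ""
    · simp [pvScan, h0] at h
      simpa [pvClean, h0] using ih h
    · by_cases h1 : x ∈ pyAllowed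
      · simp [pvScan, h0, h1] at h
        obtain ⟨rfl, rfl⟩ := h
        exact ⟨by simp [pvClean, h0, h1], h0, h1⟩
      · simp [pvScan, h0, h1] at h
        simpa [pvClean, h0, h1] using ih h

-- duplicates of an element already in the set are ignored by the fold
theorem foldl_add_filter_mem (m : List String) (s : PySem.Set String) (t : String)
    (h : t ∈ s) : m.foldl PySem.Set.add s = (m.filter (fun x => x ≠ t)).foldl PySem.Set.add s := by
  induction m generalizing s with
  | nil => rfl
  | cons x xs ih =>
    by_cases hx : x = t
    · subst hx
      have : PySem.Set.add s x = s := by simp [PySem.Set.add, h]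
      simp [this, ih s h]
    · have ht : t ∈ PySem.Set.add s x := by
        simp [PySem.Set.add]; split_ifs <;> simp [h]
      simp [hx, ih (PySem.Set.add s x) ht]
  -- a fold over elements missing from a prefix splits off that prefix
theorem foldl_add_prefix (m : List String) (a s : List String)
    (h : ∀ x ∈ m, x ∉ a) : m.foldl PySem.Set.add (a ++ s) = a ++ m.foldl PySem.Set.add s := by
  induction m generalizing s with
  | nil => rfl
  | cons x xs ih =>
    have hx : x ∉ a := h x (List.mem_cons_self ..)
    have hxs : ∀ y ∈ xs, y ∉ a := fun y hy => h y (List.mem_cons_of_mem _ hy)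
    have : PySem.Set.add (a ++ s) x = a ++ PySem.Set.add s x := by
      simp [PySem.Set.add, hx]
      split_ifs <;> simp
    simp only [List.foldl_cons, this, ih _ hxs]

theorem pvClean_filter (l : List String) (t : String) :
    pvClean (l.filter (fun x => x ≠ t)) = (pvClean l).filter (fun x => x ≠ t) := by
  simp only [pvClean, List.filter_filter]
  apply List.filter_congr
  intro x _
  by_cases hx : x = t <;> by_cases h0 : x = "" <;> simp [hx, h0, Bool.and_comm]

-- B's worklist loop computes the first-occurrence dedup of the admissible texts
theorem pvSelect_eq (l : List String) :
    pvSelect l = (pvClean l).foldl PySem.Set.add ([] : PySem.Set String) := by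
  rw [pvSelect]
  split
  · next h => rw [pvScan_none h]; rfl
  · next t tail h =>
    obtain ⟨hc, ht0, ht1⟩ := pvScan_some h
    rw [hc, List.foldl_cons]
    have hadd : PySem.Set.add ([] : PySem.Set String) t = [t] := by simp [PySem.Set.add]
    rw [hadd, foldl_add_filter_mem _ [t] t (by simp)]
    have : ([t] : List String) = [t] ++ [] := by simp
    rw [this, foldl_add_prefix _ [t] []
      (by intro x hx; simp at hx ⊢; tauto)]
    have hfc : (pvClean tail).filter (fun x => x ≠ t) = pvClean (tail.filter (fun x => x ≠ t)) :=
      (pvClean_filter tail t).symm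
    rw [hfc, ← pvSelect_eq (tail.filter (fun x => x ≠ t))]
    simp
termination_by l.length
decreasing_by
  exact Nat.lt_of_le_of_lt (List.length_filter_le _ _) (pvScan_length (by assumption))

-- named copy of A's loop body (used only by the proofs)
def stepA (acc : List String × PySem.Set String) (item : String) : List String × PySem.Set String :=
  let text := PySem.Str.strip item
  if text = "" then acc
  else if pyAllowed.contains text = false then acc
  else if acc.2.contains text then acc
  else (acc.1 ++ [text], PySem.Set.add acc.2 text)

def stepU (acc : List String × PySem.Set String) (value : String) : List String × PySem.Set String :=
  let text := PySem.Str.strip value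
  if text = "" ∨ acc.2.contains text then acc
  else (acc.1 ++ [text], PySem.Set.add acc.2 text)

-- A's loop keeps its ordered list equal (as a list) to its seen-set; both components equal
-- folding Set.add over the admissible stripped texts.
theorem loopA_pair (l : List String) (s : PySem.Set String) :
    l.foldl stepA (s, s)
      = ((pvClean (l.map PySem.Str.strip)).foldl PySem.Set.add s,
         (pvClean (l.map PySem.Str.strip)).foldl PySem.Set.add s) := by
  induction l generalizing s with
  | nil => simp [pvClean]
  | cons x xs ih =>
    rw [List.foldl_cons]
    by_cases h0 : PySem.Str.strip x = ""
    · have hs : stepA (s, s) x = (s, s) := by simp [stepA, h0]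
      have hc : pvClean ((x :: xs).map PySem.Str.strip) = pvClean (xs.map PySem.Str.strip) := by
        simp [pvClean, h0]
      rw [hs, ih, hc]
    · by_cases h1 : PySem.Str.strip x ∈ pyAllowed
      · have hc : pvClean ((x :: xs).map PySem.Str.strip)
            = PySem.Str.strip x :: pvClean (xs.map PySem.Str.strip) := by
          simp [pvClean, h0, h1]
        by_cases h2 : PySem.Str.strip x ∈ s
        · have hs : stepA (s, s) x = (s, s) := by simp [stepA, h0, h1, h2]
          have hadd : PySem.Set.add s (PySem.Str.strip x) = s := by
            simp [PySem.Set.add, h2]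
          rw [hs, ih, hc, List.foldl_cons, hadd]
        · have hadd : PySem.Set.add s (PySem.Str.strip x) = s ++ [PySem.Str.strip x] := by
            simp [PySem.Set.add, h2]
          have hs : stepA (s, s) x
              = (PySem.Set.add s (PySem.Str.strip x), PySem.Set.add s (PySem.Str.strip x)) := by
            simp [stepA, h0, h1, h2]
          rw [hs, ih, hc, List.foldl_cons]
      · have hs : stepA (s, s) x = (s, s) := by simp [stepA, h0, h1]
        have hc : pvClean ((x :: xs).map PySem.Str.strip) = pvClean (xs.map PySem.Str.strip) := by
          simp [pvClean, h0, h1]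
        rw [hs, ih, hc]

theorem allowed_ne_empty (t : String) (h : t ∈ pyAllowed) : ¬ t = "" := by
  intro he; subst he; revert h; decide

-- _unique_list's loop, on lists whose every item strips to an allowed source
theorem loopU_pair (l : List String) (s : PySem.Set String)
    (h : ∀ x ∈ l, PySem.Str.strip x ∈ pyAllowed) :
    l.foldl stepU (s, s)
      = ((l.map PySem.Str.strip).foldl PySem.Set.add s,
         (l.map PySem.Str.strip).foldl PySem.Set.add s) := by
  induction l generalizing s with
  | nil => simp
  | cons x xs ih =>
    have hx : PySem.Str.strip x ∈ pyAllowed := h x (List.mem_cons_self ..)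
    have hne : ¬ PySem.Str.strip x = "" := allowed_ne_empty _ hx
    have hxs : ∀ y ∈ xs, PySem.Str.strip y ∈ pyAllowed :=
      fun y hy => h y (List.mem_cons_of_mem _ hy)
    rw [List.foldl_cons, List.map_cons]
    by_cases h2 : PySem.Str.strip x ∈ s
    · have hs : stepU (s, s) x = (s, s) := by simp [stepU, hne, h2]
      have hadd : PySem.Set.add s (PySem.Str.strip x) = s := by
        simp [PySem.Set.add, h2]
      rw [hs, ih _ hxs, List.foldl_cons, hadd]
    · have hadd : PySem.Set.add s (PySem.Str.strip x) = s ++ [PySem.Str.strip x] := by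
        simp [PySem.Set.add, h2]
      have hs : stepU (s, s) x
          = (PySem.Set.add s (PySem.Str.strip x), PySem.Set.add s (PySem.Str.strip x)) := by
        simp [stepU, hne, h2]
      rw [hs, ih _ hxs, List.foldl_cons]

-- A's fallback pipeline (filter, re-strip, dedup) equals pvClean of the stripped list
theorem fallback_clean (l : List String) :
    ((l.filter (fun item => pyAllowed.contains (PySem.Str.strip item))).map PySem.Str.strip)
      = pvClean (l.map PySem.Str.strip) := by
  induction l with
  | nil => rfl
  | cons x xs ih =>
    by_cases h : PySem.Str.strip x ∈ pyAllowed
    · have h0 : ¬ PySem.Str.strip x = "" := allowed_ne_empty _ h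
      simp only [List.map_cons]
      simpa [pvClean, h, h0] using ih
    · simp only [List.map_cons]
      simpa [pvClean, h] using ih

-- bridge lemmas stated over the ports' inline lambdas (definitionally the named steps)
theorem loopA_main (l : List String) :
    (l.foldl (fun (acc : List String × PySem.Set String) item =>
      let text := PySem.Str.strip item
      if text = "" then acc
      else if pyAllowed.contains text = false then acc
      else if acc.2.contains text then acc
      else (acc.1 ++ [text], PySem.Set.add acc.2 text)) ([], PySem.Set.empty))
    = ((pvClean (l.map PySem.Str.strip)).foldl PySem.Set.add PySem.Set.empty,
       (pvClean (l.map PySem.Str.strip)).foldl PySem.Set.add PySem.Set.empty) :=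
  loopA_pair l PySem.Set.empty

theorem loopU_main (l : List String) (h : ∀ x ∈ l, PySem.Str.strip x ∈ pyAllowed) :
    (l.foldl (fun (acc : List String × PySem.Set String) value =>
      let text := PySem.Str.strip value
      if text = "" ∨ acc.2.contains text then acc
      else (acc.1 ++ [text], PySem.Set.add acc.2 text)) ([], PySem.Set.empty))
    = ((l.map PySem.Str.strip).foldl PySem.Set.add PySem.Set.empty,
       (l.map PySem.Str.strip).foldl PySem.Set.add PySem.Set.empty) :=
  loopU_pair l PySem.Set.empty h

-- ===== VERDICT (by name: the statement is the Claim_ definition above) =====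
theorem normalize_provenance_list_spec : Claim_equal_normalize_provenance_list := by
  intro provenance fallback _hdom _hpre
  unfold Spec_normalize_provenance_list normalize_provenance_list normalize_provenance_list_alt pvUniqueList
  rw [loopA_main]
  have hU := loopU_main ((fallback.getD []).filter (fun item => pyAllowed.contains (PySem.Str.strip item)))
    (by intro x hx; simpa using (List.mem_filter.mp hx).2)
  simp only [hU, fallback_clean, pvSelect_eq]
  rfl
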